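-- pv_equiv track=rewrite | github.com/pgmmpk/pypatgen | patgen/__init__.py | stagger_range
-- ===== SOURCE A (Python) =====
-- def stagger_range(start, end):
--     middle = start + (end-start) // 2
--     left = middle - 1
--     right = middle + 1
--
--     yield middle
--
--     while left >= start or right < end:
--         if left >= start:
--             yield left
--             left -= 1
--
--         if right < end:
--             yield right
--             right += 1
-- ===== SOURCE B (Python) =====
-- def stagger_range(start, end):
--     middle = start + (end - start) // 2
--     yield middle
--     yield from sorted((i for i in range(start, end) if i != middle),
--                       key=lambda i: (abs(i - middle), i > middle))
-- ===== Notes on version B (the rewrite author's own statement) =====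
-- stated objective: simpler
-- what changed: Replaces the two-pointer while loop with a single sort: yield middle, then the remaining range values sorted by (distance from middle, right-side flag), which reproduces the outward order and left-before-right tie-break.
import Mathlib
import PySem

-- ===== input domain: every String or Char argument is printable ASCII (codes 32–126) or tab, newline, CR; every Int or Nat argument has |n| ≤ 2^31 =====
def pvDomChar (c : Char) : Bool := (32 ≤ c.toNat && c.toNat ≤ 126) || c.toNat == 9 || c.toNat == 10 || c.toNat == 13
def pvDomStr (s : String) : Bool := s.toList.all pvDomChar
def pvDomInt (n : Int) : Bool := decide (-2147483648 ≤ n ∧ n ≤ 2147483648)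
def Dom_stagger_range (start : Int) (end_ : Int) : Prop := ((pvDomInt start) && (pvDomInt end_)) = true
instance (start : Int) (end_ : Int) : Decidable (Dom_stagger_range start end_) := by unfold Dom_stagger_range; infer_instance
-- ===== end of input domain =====

-- B yields middle then sorts the remaining range values by (distance, side) instead of A's two-pointer loop; objective: simpler.

-- ===== PORT A =====
def staggerLoop (start end_ left right : Int) : List Int :=
  if start ≤ left ∨ right < end_ then
    (if start ≤ left then [left] else []) ++
    (if right < end_ then [right] else []) ++
    staggerLoop start end_ (if start ≤ left then left - 1 else left)
                           (if right < end_ then right + 1 else right)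
  else []
termination_by (left - start + 1).toNat + (end_ - right).toNat
decreasing_by
  split_ifs with h1 h2 <;> omega

def stagger_range (start : Int) (end_ : Int) : List Int :=
  let middle := start + PySem.Int.floordiv (end_ - start) 2
  middle :: staggerLoop start end_ (middle - 1) (middle + 1)

-- ===== PORT B =====
def stagger_range_alt (start : Int) (end_ : Int) : List Int :=
  let middle := start + PySem.Int.floordiv (end_ - start) 2
  middle :: PySem.List.sorted2
      ((PySem.List.pyRange start end_ 1).filter (fun i => decide (i ≠ middle)))
      (fun i => |i - middle|) (fun i => decide (middle < i))

-- ===== PRECONDITION & SPEC =====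
def Spec_stagger_range (start : Int) (end_ : Int) (out : List Int) : Prop := out = stagger_range_alt start end_
instance (start : Int) (end_ : Int) (out : List Int) : Decidable (Spec_stagger_range start end_ out) := by unfold Spec_stagger_range; infer_instance

-- ===== CLAIM (what is proved, stated in full; the proofs are below) =====
def Claim_equal_stagger_range : Prop := ∀ (start : Int) (end_ : Int), Dom_stagger_range start end_ → Spec_stagger_range start end_ (stagger_range start end_)

-- ===== LEMMAS AND PROOFS =====

-- single-integer encoding of the tuple key (abs(i-middle), i > middle)
def pvK (m i : Int) : Int := 2 * |i - m| + (if m < i then 1 else 0)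

lemma sorted2_eq_sorted_pvK (xs : List Int) (m : Int) :
    PySem.List.sorted2 xs (fun i => |i - m|) (fun i => decide (m < i)) =
    PySem.List.sorted xs (pvK m) := by
  rw [PySem.List.sorted_eq_foldl_insertBy]
  show List.foldl (fun acc x => PySem.List.insertBy
      (fun a b => decide (|a - m| < |b - m|) ||
        (!decide (|b - m| < |a - m|) && decide (decide (m < a) < decide (m < b)))) x acc) [] xs = _
  congr 1
  funext acc x
  congr 1
  funext a b
  rw [Bool.eq_iff_iff]
  simp only [Bool.or_eq_true, Bool.and_eq_true, Bool.not_eq_true', decide_eq_true_eq,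
    decide_eq_false_iff_not, pvK, Bool.lt_iff, decide_eq_true_eq]
  rcases abs_cases (a - m) with ⟨ha, _⟩ | ⟨ha, _⟩ <;>
    rcases abs_cases (b - m) with ⟨hb, _⟩ | ⟨hb, _⟩ <;>
    rw [ha, hb] <;> split_ifs <;> omega

lemma pvK_left (m d : Int) (hd : 0 ≤ d) : pvK m (m - d) = 2 * d := by
  unfold pvK
  rw [if_neg (by omega)]
  have h1 : m - d - m = -d := by ring
  rw [h1, abs_neg, abs_of_nonneg hd]
  ring

lemma pvK_right (m d : Int) (hd : 1 ≤ d) : pvK m (m + d) = 2 * d + 1 := by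
  unfold pvK
  rw [if_pos (by omega)]
  have h1 : m + d - m = d := by ring
  rw [h1, abs_of_nonneg (by omega)]

lemma loop_char (start end_ m : Int) (_hs : start ≤ m) (_he : m < end_) :
    ∀ k : Nat, ∀ d : Int, 1 ≤ d → (m - d + 1 - start).toNat + (end_ - (m + d)).toNat < k →
    (staggerLoop start end_ (max (start - 1) (m - d)) (min end_ (m + d))).Perm
        (PySem.List.pyRange start (m - d + 1) 1 ++ PySem.List.pyRange (m + d) end_ 1)
    ∧ (staggerLoop start end_ (max (start - 1) (m - d)) (min end_ (m + d))).Pairwise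
        (fun a b => pvK m a < pvK m b)
    ∧ ∀ x ∈ staggerLoop start end_ (max (start - 1) (m - d)) (min end_ (m + d)), 2 * d ≤ pvK m x := by
  intro k
  induction k with
  | zero =>
    intro d hd hk
    exact absurd hk (by omega)
  | succ k ih =>
    intro d hd hk
    rw [staggerLoop]
    by_cases hL : start ≤ m - d <;> by_cases hR : m + d < end_
    · -- both sides active
      have e1 : max (start - 1) (m - d) = m - d := by omega
      have e2 : min end_ (m + d) = m + d := by omega
      rw [e1, e2, if_pos (by omega), if_pos hL, if_pos hR, if_pos hL, if_pos hR]
      obtain ⟨hperm, hpair, hbnd⟩ := ih (d + 1) (by omega) (by omega)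
      rw [show m - (d + 1) = m - d - 1 from by ring, show m + (d + 1) = m + d + 1 from by ring]
        at hperm hpair hbnd
      rw [show m - d - 1 + 1 = m - d from by ring] at hperm
      have e3 : m - d - 1 = max (start - 1) (m - d - 1) := by omega
      have e4 : m + d + 1 = min end_ (m + d + 1) := by omega
      rw [e3, e4]
      have hA : PySem.List.pyRange start (m - d + 1) 1
          = PySem.List.pyRange start (m - d) 1 ++ [m - d] :=
        PySem.List.pyRange_one_succ_right hL
      have hB : PySem.List.pyRange (m + d) end_ 1
          = (m + d) :: PySem.List.pyRange (m + d + 1) end_ 1 :=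
        PySem.List.pyRange_one_cons hR
      refine ⟨?_, ?_, ?_⟩
      · rw [hA, hB]
        simp only [List.cons_append, List.nil_append, List.append_assoc]
        exact (((hperm.cons (m + d)).trans List.perm_middle.symm).cons (m - d)).trans
          List.perm_middle.symm
      · simp only [List.cons_append, List.nil_append, List.pairwise_cons, List.mem_cons]
        refine ⟨?_, ?_, hpair⟩
        · rintro x (rfl | hx)
          · rw [pvK_left m d (by omega), pvK_right m d hd]; omega
          · have := hbnd x hx
            rw [pvK_left m d (by omega)]; omega
        · intro x hx
          have := hbnd x hx
          rw [pvK_right m d hd]; omega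
      · simp only [List.cons_append, List.nil_append, List.mem_cons]
        rintro x (rfl | rfl | hx)
        · rw [pvK_left m d (by omega)]
        · rw [pvK_right m d hd]; omega
        · have := hbnd x hx; omega
    · -- only left active
      have e1 : max (start - 1) (m - d) = m - d := by omega
      have e2 : min end_ (m + d) = end_ := by omega
      rw [e1, e2, if_pos (by omega), if_pos hL, if_neg (by omega), if_pos hL, if_neg (by omega)]
      obtain ⟨hperm, hpair, hbnd⟩ := ih (d + 1) (by omega) (by omega)
      rw [show m - (d + 1) = m - d - 1 from by ring, show m + (d + 1) = m + d + 1 from by ring]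
        at hperm hpair hbnd
      rw [show m - d - 1 + 1 = m - d from by ring] at hperm
      rw [show min end_ (m + d + 1) = end_ from by omega] at hperm hpair hbnd
      have e3 : m - d - 1 = max (start - 1) (m - d - 1) := by omega
      rw [e3]
      have hBnil : PySem.List.pyRange (m + d + 1) end_ 1 = [] :=
        PySem.List.pyRange_one_eq_nil (by omega)
      have hBnil' : PySem.List.pyRange (m + d) end_ 1 = [] :=
        PySem.List.pyRange_one_eq_nil (by omega)
      rw [hBnil, List.append_nil] at hperm
      have hA : PySem.List.pyRange start (m - d + 1) 1
          = PySem.List.pyRange start (m - d) 1 ++ [m - d] :=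
        PySem.List.pyRange_one_succ_right hL
      refine ⟨?_, ?_, ?_⟩
      · rw [hA, hBnil']
        simp only [List.append_nil, List.singleton_append]
        exact (hperm.cons (m - d)).trans (List.perm_append_singleton _ _).symm
      · simp only [List.singleton_append, List.pairwise_cons]
        refine ⟨?_, hpair⟩
        intro x hx
        have := hbnd x hx
        rw [pvK_left m d (by omega)]; omega
      · simp only [List.singleton_append, List.mem_cons]
        rintro x (rfl | hx)
        · rw [pvK_left m d (by omega)]
        · have := hbnd x hx; omega
    · -- only right active
      have e1 : max (start - 1) (m - d) = start - 1 := by omega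
      have e2 : min end_ (m + d) = m + d := by omega
      rw [e1, e2, if_pos (by omega), if_neg (by omega), if_pos hR, if_neg (by omega), if_pos hR]
      obtain ⟨hperm, hpair, hbnd⟩ := ih (d + 1) (by omega) (by omega)
      rw [show m - (d + 1) = m - d - 1 from by ring, show m + (d + 1) = m + d + 1 from by ring]
        at hperm hpair hbnd
      rw [show m - d - 1 + 1 = m - d from by ring] at hperm
      rw [show max (start - 1) (m - d - 1) = start - 1 from by omega] at hperm hpair hbnd
      have e4 : m + d + 1 = min end_ (m + d + 1) := by omega
      rw [e4]
      have hAnil : PySem.List.pyRange start (m - d) 1 = [] :=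
        PySem.List.pyRange_one_eq_nil (by omega)
      have hAnil' : PySem.List.pyRange start (m - d + 1) 1 = [] :=
        PySem.List.pyRange_one_eq_nil (by omega)
      rw [hAnil, List.nil_append] at hperm
      have hB : PySem.List.pyRange (m + d) end_ 1
          = (m + d) :: PySem.List.pyRange (m + d + 1) end_ 1 :=
        PySem.List.pyRange_one_cons hR
      refine ⟨?_, ?_, ?_⟩
      · rw [hAnil', hB]
        simp only [List.nil_append, List.singleton_append]
        exact hperm.cons (m + d)
      · simp only [List.nil_append, List.singleton_append, List.pairwise_cons]
        refine ⟨?_, hpair⟩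
        intro x hx
        have := hbnd x hx
        rw [pvK_right m d hd]; omega
      · simp only [List.nil_append, List.singleton_append, List.mem_cons]
        rintro x (rfl | hx)
        · rw [pvK_right m d hd]; omega
        · have := hbnd x hx; omega
    · -- neither active
      rw [if_neg (by omega)]
      have hAnil : PySem.List.pyRange start (m - d + 1) 1 = [] :=
        PySem.List.pyRange_one_eq_nil (by omega)
      have hBnil : PySem.List.pyRange (m + d) end_ 1 = [] :=
        PySem.List.pyRange_one_eq_nil (by omega)
      rw [hAnil, hBnil]
      exact ⟨List.Perm.refl _, List.Pairwise.nil, by intro x hx; simp at hx⟩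

lemma filter_range_eq (start end_ m : Int) (hs : start ≤ m) (he : m < end_) :
    (PySem.List.pyRange start end_ 1).filter (fun i => decide (i ≠ m))
      = PySem.List.pyRange start m 1 ++ PySem.List.pyRange (m + 1) end_ 1 := by
  rw [PySem.List.pyRange_one_append start m end_ hs (by omega),
      PySem.List.pyRange_one_cons he, List.filter_append, List.filter_cons]
  simp only [decide_not, ne_eq, not_true_eq_false, decide_false, Bool.false_eq_true]
  rw [List.filter_eq_self.mpr, List.filter_eq_self.mpr]
  · simp
  · intro a ha
    have := (PySem.List.mem_pyRange_one).mp ha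
    simp; omega
  · intro a ha
    have := (PySem.List.mem_pyRange_one).mp ha
    simp; omega

-- ===== VERDICT (by name: the statement is the Claim_ definition above) =====
theorem stagger_range_spec : Claim_equal_stagger_range := by
  intro start end_ _hdom
  unfold Spec_stagger_range stagger_range stagger_range_alt
  have hfd : PySem.Int.floordiv (end_ - start) 2 = (end_ - start) / 2 :=
    PySem.Int.floordiv_eq_ediv_of_pos (by omega)
  simp only [hfd]
  set m := start + (end_ - start) / 2 with hm
  by_cases h : start < end_
  · have hs : start ≤ m := by omega
    have he : m < end_ := by omega
    congr 1
    rw [sorted2_eq_sorted_pvK]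
    obtain ⟨hperm, hpair, _⟩ := loop_char start end_ m hs he
      ((m - 1 + 1 - start).toNat + (end_ - (m + 1)).toNat + 1) 1 (by omega) (by omega)
    have e1 : max (start - 1) (m - 1) = m - 1 := by omega
    have e2 : min end_ (m + 1) = m + 1 := by omega
    rw [e1, e2] at hperm hpair
    have erng : m - 1 + 1 = m := by ring
    rw [erng] at hperm
    rw [filter_range_eq start end_ m hs he]
    exact (PySem.List.sorted_eq_of_perm_of_pairwise_lt _ _ _ hperm hpair).symm
  · have hnil : PySem.List.pyRange start end_ 1 = [] :=
      PySem.List.pyRange_one_eq_nil (by omega)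
    have hloop : staggerLoop start end_ (m - 1) (m + 1) = [] := by
      rw [staggerLoop, if_neg (by omega)]
    rw [hnil, hloop]
    rfl
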